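-- pv_equiv track=rewrite | github.com/janson9192/autokws2021 | baseline_1/local/std/make_utt2vad.py | get_start_and_end_point
-- ===== SOURCE A (Python) =====
-- def get_start_and_end_point(vad_dict, decision_times=3):
--     start_dict = {}
--     end_dict = {}
--     for utt, vad in vad_dict.items():
--         start_flag = 0
--         for a in range(0,len(vad),1):
--             if vad[a] == 1:
--                 start_flag += 1
--                 if start_flag == decision_times:
--                     start_dict[utt] = a - (decision_times - 1)
--                     break
--             elif start_flag != 0:
--                 # vad[a] == 0 and start_flag != 0 means the times of
--                 # vad[a] == 1 is less than decision_times, so we need to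
--                 # reset start_flag to 0
--                 start_flag = 0
--         end_flag = 0
--         for a in range(len(vad)-1,-1,-1):
--             if vad[a] == 1:
--                 end_flag += 1
--                 if end_flag == decision_times:
--                     end_dict[utt] = a + (decision_times - 1)
--                     break
--             elif end_flag != 0:
--                 # vad[a] == 0 and end_flag != 0 means the times of
--                 # vad[a] == 1 is less than decision_times, so we need to
--                 # reset end_flag to 0
--                 end_flag = 0
--     return start_dict, end_dict
-- ===== SOURCE B (Python) =====
-- def get_start_and_end_point(vad_dict, decision_times=3):
--     # Run-based: collect maximal runs of 1s, then pick first/last run long enough.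
--     start_dict = {}
--     end_dict = {}
--     for utt, vad in vad_dict.items():
--         runs = []
--         i, n = 0, len(vad)
--         while i < n:
--             if vad[i] == 1:
--                 j = i + 1
--                 while j < n and vad[j] == 1:
--                     j += 1
--                 runs.append((i, j - 1, j - i))
--                 i = j
--             else:
--                 i += 1
--         if decision_times >= 1:
--             good = [r for r in runs if r[2] >= decision_times]
--             if good:
--                 start_dict[utt] = good[0][0]
--                 end_dict[utt] = good[-1][1]
--     return start_dict, end_dict
-- ===== Notes on version B (the rewrite author's own statement) =====
-- stated objective: alternative
-- what changed: Replaces A's two counter-with-reset scans (forward for start, backward for end) by a single pass that groups the maximal runs of 1s as (start, end, length) triples and then selects the first and last run of length >= decision_times.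
import Mathlib
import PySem

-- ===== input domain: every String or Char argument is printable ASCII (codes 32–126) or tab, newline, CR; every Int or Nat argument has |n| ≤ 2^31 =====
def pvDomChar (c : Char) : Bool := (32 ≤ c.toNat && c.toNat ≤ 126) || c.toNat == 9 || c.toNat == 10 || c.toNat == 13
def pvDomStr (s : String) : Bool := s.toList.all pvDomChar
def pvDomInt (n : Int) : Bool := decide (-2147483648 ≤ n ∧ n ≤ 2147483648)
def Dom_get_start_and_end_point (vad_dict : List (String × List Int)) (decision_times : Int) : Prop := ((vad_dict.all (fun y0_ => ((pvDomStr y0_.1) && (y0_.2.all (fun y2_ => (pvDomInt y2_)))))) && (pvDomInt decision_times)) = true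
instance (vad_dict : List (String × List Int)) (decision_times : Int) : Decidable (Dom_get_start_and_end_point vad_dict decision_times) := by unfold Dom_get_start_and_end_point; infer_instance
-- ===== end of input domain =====

-- B replaces A's two counter-reset scans by one pass grouping the maximal runs of 1s
-- and then selecting the first/last sufficiently long run (objective: alternative decomposition).

-- ===== PORT A =====
-- forward scan: counts consecutive 1s, records a-(dt-1) when the counter hits dt
def aStartGo (vad : List Int) (dt : Int) (a : Nat) (flag : Int) : Option Int :=
  if _h : a < vad.length then
    if vad[a]! = 1 then
      if flag + 1 = dt then some ((a : Int) - (dt - 1))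
      else aStartGo vad dt (a + 1) (flag + 1)
    else if flag ≠ 0 then aStartGo vad dt (a + 1) 0
    else aStartGo vad dt (a + 1) flag
  else none
termination_by vad.length - a

-- backward scan over indices k-1, k-2, …, 0 (k = current index + 1)
def aEndGo (vad : List Int) (dt : Int) : Nat → Int → Option Int
  | 0, _ => none
  | k + 1, flag =>
    if vad[k]! = 1 then
      if flag + 1 = dt then some ((k : Int) + (dt - 1))
      else aEndGo vad dt k (flag + 1)
    else if flag ≠ 0 then aEndGo vad dt k 0
    else aEndGo vad dt k flag

def get_start_and_end_point (vad_dict : List (String × List Int)) (decision_times : Int) : (List (String × Int)) × (List (String × Int)) :=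
  let p := vad_dict.foldl
    (fun (st : PySem.Dict String Int × PySem.Dict String Int) uv =>
      let sd := match aStartGo uv.2 decision_times 0 0 with
        | some s => st.1.insert uv.1 s
        | none => st.1
      let ed := match aEndGo uv.2 decision_times uv.2.length 0 with
        | some e => st.2.insert uv.1 e
        | none => st.2
      (sd, ed))
    (PySem.Dict.empty, PySem.Dict.empty)
  (p.1.items, p.2.items)

-- ===== PORT B =====
-- inner while: advance j while vad[j] == 1
def runFwd (vad : List Int) (j : Nat) : Nat :=
  if j < vad.length ∧ vad[j]! = 1 then runFwd vad (j + 1) else j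
termination_by vad.length - j
decreasing_by omega

theorem runFwd_ge (vad : List Int) (j : Nat) : j ≤ runFwd vad j := by
  unfold runFwd
  split
  · exact le_trans (by omega) (runFwd_ge vad (j + 1))
  · exact le_refl j
termination_by vad.length - j
decreasing_by omega

-- outer while: collect maximal runs of 1s as (start, end, length)
def runsGo (vad : List Int) (i : Nat) : List (Int × Int × Int) :=
  if i < vad.length then
    if vad[i]! = 1 then
      let j := runFwd vad (i + 1)
      ((i : Int), ((j : Int) - 1), ((j : Int) - (i : Int))) :: runsGo vad j
    else runsGo vad (i + 1)
  else []
termination_by vad.length - i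
decreasing_by
  · have := runFwd_ge vad (i + 1); omega
  · omega

def get_start_and_end_point_alt (vad_dict : List (String × List Int)) (decision_times : Int) : (List (String × Int)) × (List (String × Int)) :=
  let p := vad_dict.foldl
    (fun (st : PySem.Dict String Int × PySem.Dict String Int) uv =>
      let runs := runsGo uv.2 0
      if 1 ≤ decision_times then
        let good := runs.filter (fun r => decision_times ≤ r.2.2)
        match good.head?, good.getLast? with
        | some r0, some r1 => (st.1.insert uv.1 r0.1, st.2.insert uv.1 r1.2.1)
        | _, _ => st
      else st)
    (PySem.Dict.empty, PySem.Dict.empty)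
  (p.1.items, p.2.items)

-- ===== PRECONDITION & SPEC =====
def Spec_get_start_and_end_point (vad_dict : List (String × List Int)) (decision_times : Int) (out : (List (String × Int)) × (List (String × Int))) : Prop := out = get_start_and_end_point_alt vad_dict decision_times
instance (vad_dict : List (String × List Int)) (decision_times : Int) (out : (List (String × Int)) × (List (String × Int))) : Decidable (Spec_get_start_and_end_point vad_dict decision_times out) := by unfold Spec_get_start_and_end_point; infer_instance

-- ===== CLAIM (what is proved, stated in full; the proofs are below) =====
def Claim_equal_get_start_and_end_point : Prop := ∀ (vad_dict : List (String × List Int)) (decision_times : Int), Dom_get_start_and_end_point vad_dict decision_times → Spec_get_start_and_end_point vad_dict decision_times (get_start_and_end_point vad_dict decision_times)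

-- ===== LEMMAS AND PROOFS =====

-- negative/zero thresholds: the counters never hit dt
theorem aStartGo_none (vad : List Int) (dt : Int) (hdt : dt ≤ 0) (a : Nat) (f : Int) (hf : 0 ≤ f) :
    aStartGo vad dt a f = none := by
  rw [aStartGo]
  split
  · split
    · split
      · exfalso; omega
      · exact aStartGo_none vad dt hdt (a + 1) (f + 1) (by omega)
    · split
      · exact aStartGo_none vad dt hdt (a + 1) 0 (by omega)
      · exact aStartGo_none vad dt hdt (a + 1) f hf
  · rfl
termination_by vad.length - a
decreasing_by all_goals omega

theorem aEndGo_none (vad : List Int) (dt : Int) (hdt : dt ≤ 0) (k : Nat) (f : Int) (hf : 0 ≤ f) :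
    aEndGo vad dt k f = none := by
  induction k generalizing f with
  | zero => rfl
  | succ m ih =>
    rw [aEndGo]
    split
    · split
      · exfalso; omega
      · exact ih (f + 1) (by omega)
    · split
      · exact ih 0 (by omega)
      · exact ih f hf

-- bound-parametrised versions of B's run collection (proof helpers)
def runFwdK (vad : List Int) (k j : Nat) : Nat :=
  if j < k ∧ vad[j]! = 1 then runFwdK vad k (j + 1) else j
termination_by k - j
decreasing_by omega

theorem runFwdK_ge (vad : List Int) (k j : Nat) : j ≤ runFwdK vad k j := by
  rw [runFwdK]
  split
  · exact le_trans (by omega) (runFwdK_ge vad k (j + 1))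
  · exact le_refl j
termination_by k - j
decreasing_by omega

def runsGoK (vad : List Int) (k i : Nat) : List (Int × Int × Int) :=
  if i < k then
    if vad[i]! = 1 then
      let j := runFwdK vad k (i + 1)
      ((i : Int), ((j : Int) - 1), ((j : Int) - (i : Int))) :: runsGoK vad k j
    else runsGoK vad k (i + 1)
  else []
termination_by k - i
decreasing_by
  · have := runFwdK_ge vad k (i + 1); omega
  · omega

theorem runFwd_eq_K (vad : List Int) (j : Nat) : runFwd vad j = runFwdK vad vad.length j := by
  rw [runFwd, runFwdK]
  by_cases h : j < vad.length ∧ vad[j]! = 1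
  · rw [if_pos h, if_pos h, runFwd_eq_K vad (j + 1)]
  · rw [if_neg h, if_neg h]
termination_by vad.length - j
decreasing_by omega

theorem runsGo_eq_K (vad : List Int) (i : Nat) : runsGo vad i = runsGoK vad vad.length i := by
  rw [runsGo, runsGoK]
  by_cases hi : i < vad.length
  · rw [if_pos hi, if_pos hi]
    by_cases h1 : vad[i]! = 1
    · rw [if_pos h1, if_pos h1, runFwd_eq_K vad (i + 1)]
      exact congrArg (List.cons _) (runsGo_eq_K vad (runFwdK vad vad.length (i + 1)))
    · rw [if_neg h1, if_neg h1, runsGo_eq_K vad (i + 1)]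
  · rw [if_neg hi, if_neg hi]
termination_by vad.length - i
decreasing_by
  · have := runFwdK_ge vad vad.length (i + 1); omega
  · omega

theorem runFwdK_le (vad : List Int) (k j : Nat) (h : j ≤ k) : runFwdK vad k j ≤ k := by
  rw [runFwdK]
  split
  · exact runFwdK_le vad k (j + 1) (by omega)
  · exact h
termination_by k - j
decreasing_by omega

theorem runFwdK_ones (vad : List Int) (k j : Nat) :
    ∀ m, j ≤ m → m < runFwdK vad k j → vad[m]! = 1 := by
  intro m hjm hm
  rw [runFwdK] at hm
  split at hm
  · rename_i hc
    by_cases hme : m = j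
    · subst hme; exact hc.2
    · exact runFwdK_ones vad k (j + 1) m (by omega) hm
  · omega
termination_by k - j
decreasing_by omega

theorem runFwdK_stop (vad : List Int) (k j : Nat) :
    ¬ (runFwdK vad k j < k ∧ vad[runFwdK vad k j]! = 1) := by
  rw [runFwdK]
  split
  · exact runFwdK_stop vad k (j + 1)
  · rename_i hc; exact hc
termination_by k - j
decreasing_by omega

-- all ones up to the bound: the inner while runs to the bound
theorem runFwdK_full (vad : List Int) (k a : Nat) (ha : a ≤ k)
    (hones : ∀ m, a ≤ m → m < k → vad[m]! = 1) : runFwdK vad k a = k := by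
  rw [runFwdK]
  by_cases hc : a < k ∧ vad[a]! = 1
  · rw [if_pos hc]
    exact runFwdK_full vad k (a + 1) (by omega) (fun m h1 h2 => hones m (by omega) h2)
  · rw [if_neg hc]
    have : ¬ a < k := fun h => hc ⟨h, hones a le_rfl h⟩
    omega
termination_by k - a
decreasing_by omega

-- a blocker below both bounds makes runFwdK independent of the bound
theorem runFwdK_blocker (vad : List Int) (k k' a b : Nat) (hb : vad[b]! ≠ 1)
    (hab : a ≤ b) (hbk : b < k) (hbk' : b ≤ k') :
    runFwdK vad k a = runFwdK vad k' a ∧ runFwdK vad k a ≤ b := by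
  by_cases h1 : vad[a]! = 1
  · have hae : a ≠ b := fun h => hb (h ▸ h1)
    have h := runFwdK_blocker vad k k' (a + 1) b hb (by omega) hbk hbk'
    have e1 : runFwdK vad k a = runFwdK vad k (a + 1) := by
      conv_lhs => rw [runFwdK]
      rw [if_pos ⟨by omega, h1⟩]
    have e2 : runFwdK vad k' a = runFwdK vad k' (a + 1) := by
      conv_lhs => rw [runFwdK]
      rw [if_pos ⟨by omega, h1⟩]
    exact ⟨by rw [e1, e2, h.1], by rw [e1]; exact h.2⟩
  · have e1 : runFwdK vad k a = a := by
      conv_lhs => rw [runFwdK]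
      rw [if_neg (fun hc => h1 hc.2)]
    have e2 : runFwdK vad k' a = a := by
      conv_lhs => rw [runFwdK]
      rw [if_neg (fun hc => h1 hc.2)]
    exact ⟨by rw [e1, e2], by rw [e1]; exact hab⟩
termination_by b - a
decreasing_by all_goals omega

-- dropping a trailing non-1 does not change the runs
theorem runsGoK_drop (vad : List Int) (k : Nat) (hk : 0 < k) (hlast : vad[k - 1]! ≠ 1) (i : Nat) :
    runsGoK vad k i = runsGoK vad (k - 1) i := by
  rw [runsGoK]
  conv_rhs => rw [runsGoK]
  by_cases hik : i < k
  · by_cases hik1 : i < k - 1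
    · by_cases h1 : vad[i]! = 1
      · obtain ⟨hej, _⟩ := runFwdK_blocker vad k (k - 1) (i + 1) (k - 1) hlast (by omega) (by omega) le_rfl
        rw [if_pos hik, if_pos hik1, if_pos h1, if_pos h1, hej]
        have hge := runFwdK_ge vad (k - 1) (i + 1)
        exact congrArg (List.cons _) (runsGoK_drop vad k hk hlast (runFwdK vad (k - 1) (i + 1)))
      · rw [if_pos hik, if_pos hik1, if_neg h1, if_neg h1]
        exact runsGoK_drop vad k hk hlast (i + 1)
    · have hie : i = k - 1 := by omega
      rw [if_pos hik, if_neg hik1, if_neg (hie ▸ hlast)]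
      rw [runsGoK, if_neg (by omega)]
  · rw [if_neg hik, if_neg (by omega)]
termination_by k - i
decreasing_by
  · have := runFwdK_ge vad (k - 1) (i + 1); omega
  · omega

-- a final full run appends one triple
theorem runsGoK_append (vad : List Int) (k s : Nat) (hsk : s < k)
    (hones : ∀ m, s ≤ m → m < k → vad[m]! = 1)
    (hbound : s = 0 ∨ vad[s - 1]! ≠ 1) (i : Nat) (hi : i ≤ s) :
    runsGoK vad k i = runsGoK vad s i ++ [((s : Int), (k : Int) - 1, (k : Int) - (s : Int))] := by
  rw [runsGoK]
  conv_rhs => rw [runsGoK]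
  by_cases his : i < s
  · have hs1 : vad[s - 1]! ≠ 1 := by
      rcases hbound with h | h
      · omega
      · exact h
    by_cases h1 : vad[i]! = 1
    · have hne : i ≠ s - 1 := fun h => hs1 (h ▸ h1)
      obtain ⟨hej, hjb⟩ := runFwdK_blocker vad k s (i + 1) (s - 1) hs1 (by omega) (by omega) (by omega)
      rw [if_pos (by omega : i < k), if_pos his, if_pos h1, if_pos h1, hej]
      have hge := runFwdK_ge vad s (i + 1)
      rw [List.cons_append]
      exact congrArg (List.cons _) (runsGoK_append vad k s hsk hones hbound (runFwdK vad s (i + 1)) (by omega))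
    · rw [if_pos (by omega : i < k), if_pos his, if_neg h1, if_neg h1]
      exact runsGoK_append vad k s hsk hones hbound (i + 1) (by omega)
  · have hie : i = s := by omega
    subst hie
    have hfull : runFwdK vad k (i + 1) = k :=
      runFwdK_full vad k (i + 1) (by omega) (fun m h1 h2 => hones m (by omega) h2)
    have hnil : runsGoK vad k k = [] := by rw [runsGoK, if_neg (lt_irrefl k)]
    rw [if_pos hsk, if_neg (lt_irrefl i), if_pos (hones i le_rfl hsk)]
    simp [hfull, hnil]
termination_by s - i
decreasing_by
  · have := runFwdK_ge vad s (i + 1); omega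
  · omega

-- forward counter through a block of 1s
theorem aStartGo_run (vad : List Int) (dt : Int) (p q : Nat) (f : Int) (hf : 0 ≤ f)
    (hpq : p ≤ q) (hq : q ≤ vad.length)
    (hones : ∀ m, p ≤ m → m < q → vad[m]! = 1)
    (hstop : ¬ (q < vad.length ∧ vad[q]! = 1)) :
    aStartGo vad dt p f =
      if f < dt ∧ dt ≤ f + ((q : Int) - (p : Int)) then some ((p : Int) - f)
      else aStartGo vad dt q (f + ((q : Int) - (p : Int))) := by
  by_cases hpq' : p = q
  · subst hpq'
    rw [if_neg (by omega)]
    norm_num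
  · have hp : p < q := by omega
    have hp1 : vad[p]! = 1 := hones p le_rfl hp
    rw [aStartGo, dif_pos (by omega : p < vad.length), if_pos hp1]
    by_cases hfd : f + 1 = dt
    · rw [if_pos hfd, if_pos ⟨by omega, by omega⟩]
      congr 1
      omega
    · rw [if_neg hfd]
      rw [aStartGo_run vad dt (p + 1) q (f + 1) (by omega) hp hq
        (fun m h1 h2 => hones m (by omega) h2) hstop]
      have harg : (f + 1) + ((q : Int) - ((p + 1 : Nat) : Int)) = f + ((q : Int) - (p : Int)) := by
        push_cast; ring
      rw [harg]
      split_ifs with hA hB hB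
      · congr 1; push_cast; ring
      · exfalso; push_cast at hA hB; omega
      · exfalso; push_cast at hA hB; omega
      · rfl
termination_by q - p
decreasing_by omega

theorem aStartGo_flag_irrel (vad : List Int) (dt : Int) (q : Nat)
    (hstop : ¬ (q < vad.length ∧ vad[q]! = 1)) (f : Int) :
    aStartGo vad dt q f = aStartGo vad dt q 0 := by
  rw [aStartGo]
  conv_rhs => rw [aStartGo]
  by_cases hq : q < vad.length
  · have h1 : vad[q]! ≠ 1 := fun h => hstop ⟨hq, h⟩
    rw [dif_pos hq, dif_pos hq, if_neg h1, if_neg h1]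
    by_cases hf : f = 0
    · subst hf; rfl
    · rw [if_pos hf, if_neg (by simp)]
  · rw [dif_neg hq, dif_neg hq]

-- backward counter through a block of 1s
theorem aEndGo_run (vad : List Int) (dt : Int) (q k : Nat) (f : Int) (hf : 0 ≤ f)
    (hqk : q ≤ k)
    (hones : ∀ m, q ≤ m → m < k → vad[m]! = 1) :
    aEndGo vad dt k f =
      if f < dt ∧ dt ≤ f + ((k : Int) - (q : Int)) then some ((k : Int) + f - 1)
      else aEndGo vad dt q (f + ((k : Int) - (q : Int))) := by
  by_cases hqk' : q = k
  · subst hqk'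
    rw [if_neg (by omega)]
    norm_num
  · obtain ⟨m, rfl⟩ : ∃ m, k = m + 1 := ⟨k - 1, by omega⟩
    have h1 : vad[m]! = 1 := hones m (by omega) (by omega)
    rw [aEndGo, if_pos h1]
    by_cases hfd : f + 1 = dt
    · rw [if_pos hfd, if_pos ⟨by omega, by push_cast; omega⟩]
      congr 1
      omega
    · rw [if_neg hfd]
      rw [aEndGo_run vad dt q m (f + 1) (by omega) (by omega)
        (fun t h1 h2 => hones t h1 (by omega))]
      have harg : (f + 1) + ((m : Int) - (q : Int)) = f + (((m + 1 : Nat) : Int) - (q : Int)) := by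
        push_cast; ring
      rw [harg]
      split_ifs with hA hB hB
      · congr 1; push_cast; ring
      · exfalso; push_cast at hA hB; omega
      · exfalso; push_cast at hA hB; omega
      · rfl

theorem aEndGo_flag_irrel (vad : List Int) (dt : Int) (q : Nat) (hq : vad[q]! ≠ 1) (f : Int) :
    aEndGo vad dt (q + 1) f = aEndGo vad dt q 0 := by
  rw [aEndGo, if_neg hq]
  by_cases hf : f = 0
  · subst hf; rfl
  · rw [if_pos hf]

-- start of the run of 1s ending at a given index
def runStart (vad : List Int) : Nat → Nat
  | 0 => 0
  | s + 1 => if vad[s]! = 1 then runStart vad s else s + 1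

theorem runStart_le (vad : List Int) (m : Nat) : runStart vad m ≤ m := by
  induction m with
  | zero => exact le_rfl
  | succ s ih =>
    rw [runStart]
    split
    · omega
    · exact le_rfl

theorem runStart_ones (vad : List Int) (m : Nat) :
    ∀ t, runStart vad m ≤ t → t < m → vad[t]! = 1 := by
  induction m with
  | zero => intro t h1 h2; omega
  | succ s ih =>
    intro t h1 h2
    by_cases h : vad[s]! = 1
    · rw [runStart, if_pos h] at h1
      by_cases hts : t = s
      · subst hts; exact h
      · exact ih t h1 (by omega)
    · rw [runStart, if_neg h] at h1
      omega

theorem runStart_bound (vad : List Int) (m : Nat) :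
    runStart vad m = 0 ∨ vad[runStart vad m - 1]! ≠ 1 := by
  induction m with
  | zero => exact Or.inl rfl
  | succ s ih =>
    by_cases h : vad[s]! = 1
    · rw [runStart, if_pos h]
      exact ih
    · rw [runStart, if_neg h]
      exact Or.inr (by simpa using h)

-- main forward characterisation
theorem aStart_runs (vad : List Int) (dt : Int) (hdt : 0 < dt) (i : Nat) :
    aStartGo vad dt i 0 =
      (((runsGo vad i).filter (fun r => dt ≤ r.2.2)).head?).map (·.1) := by
  rw [runsGo]
  by_cases hi : i < vad.length
  · by_cases h1 : vad[i]! = 1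
    · rw [if_pos hi, if_pos h1]
      have hj1 : i + 1 ≤ runFwd vad (i + 1) := runFwd_ge vad (i + 1)
      have hjK : runFwd vad (i + 1) = runFwdK vad vad.length (i + 1) := runFwd_eq_K vad (i + 1)
      have hjle : runFwd vad (i + 1) ≤ vad.length := by
        rw [hjK]; exact runFwdK_le vad vad.length (i + 1) (by omega)
      have hones : ∀ m, i ≤ m → m < runFwd vad (i + 1) → vad[m]! = 1 := by
        intro m hm1 hm2
        by_cases hmi : m = i
        · subst hmi; exact h1
        · exact runFwdK_ones vad vad.length (i + 1) m (by omega) (hjK ▸ hm2)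
      have hstop : ¬ (runFwd vad (i + 1) < vad.length ∧ vad[runFwd vad (i + 1)]! = 1) := by
        rw [hjK]; exact runFwdK_stop vad vad.length (i + 1)
      rw [aStartGo_run vad dt i (runFwd vad (i + 1)) 0 le_rfl (by omega) hjle hones hstop]
      by_cases hg : dt ≤ ((runFwd vad (i + 1) : Int) - (i : Int))
      · rw [if_pos ⟨hdt, by omega⟩]
        simp [hg]
      · rw [if_neg (by omega)]
        rw [aStartGo_flag_irrel vad dt (runFwd vad (i + 1)) hstop]
        rw [aStart_runs vad dt hdt (runFwd vad (i + 1))]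
        simp [hg]
    · rw [if_pos hi, if_neg h1]
      rw [aStartGo, dif_pos hi, if_neg h1, if_neg (by simp)]
      exact aStart_runs vad dt hdt (i + 1)
  · rw [if_neg hi, aStartGo, dif_neg hi]
    simp
termination_by vad.length - i
decreasing_by
  · have := runFwd_ge vad (i + 1); omega
  · omega

-- main backward characterisation
theorem aEnd_runs (vad : List Int) (dt : Int) (hdt : 0 < dt) (k : Nat) (hk : k ≤ vad.length) :
    aEndGo vad dt k 0 =
      (((runsGoK vad k 0).filter (fun r => dt ≤ r.2.2)).getLast?).map (·.2.1) := by
  by_cases hk0 : k = 0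
  · subst hk0
    rw [runsGoK, if_neg (by omega)]
    rfl
  · obtain ⟨m, rfl⟩ : ∃ m, k = m + 1 := ⟨k - 1, by omega⟩
    by_cases h1 : vad[m]! = 1
    · have hsle : runStart vad m ≤ m := runStart_le vad m
      have hones : ∀ t, runStart vad m ≤ t → t < m + 1 → vad[t]! = 1 := by
        intro t ht1 ht2
        by_cases htm : t = m
        · subst htm; exact h1
        · exact runStart_ones vad m t ht1 (by omega)
      rw [aEndGo_run vad dt (runStart vad m) (m + 1) 0 le_rfl (by omega) hones]
      rw [runsGoK_append vad (m + 1) (runStart vad m) (by omega) hones (runStart_bound vad m) 0 (by omega)]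
      by_cases hg : dt ≤ (((m + 1 : Nat) : Int) - ((runStart vad m : Nat) : Int))
      · rw [if_pos ⟨hdt, by omega⟩]
        simp only [List.filter_append, List.filter_cons, List.filter_nil]
        rw [if_pos (by simpa using hg)]
        simp
      · rw [if_neg (by omega)]
        simp only [List.filter_append, List.filter_cons, List.filter_nil]
        rw [if_neg (by simpa using hg), List.append_nil]
        by_cases hs0' : runStart vad m = 0
        · rw [hs0']
          rw [runsGoK, if_neg (by omega)]
          rfl
        · have hb : vad[runStart vad m - 1]! ≠ 1 := by
            rcases runStart_bound vad m with hb | hb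
            · exact absurd hb hs0'
            · exact hb
          obtain ⟨t, ht⟩ : ∃ t, runStart vad m = t + 1 := ⟨runStart vad m - 1, by omega⟩
          rw [ht]
          rw [aEndGo_flag_irrel vad dt t (by rw [ht] at hb; simpa using hb) _]
          rw [show runsGoK vad (t + 1) 0 = runsGoK vad t 0 from by
            have hb' : vad[t]! ≠ 1 := by rw [ht] at hb; simpa using hb
            have := runsGoK_drop vad (t + 1) (by omega) (by simpa using hb') 0
            simpa using this]
          exact aEnd_runs vad dt hdt t (by omega)
    · rw [show aEndGo vad dt (m + 1) 0 = aEndGo vad dt m 0 from aEndGo_flag_irrel vad dt m h1 0]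
      rw [show runsGoK vad (m + 1) 0 = runsGoK vad m 0 from by
        have := runsGoK_drop vad (m + 1) (by omega) (by simpa using h1) 0
        simpa using this]
      exact aEnd_runs vad dt hdt m (by omega)
termination_by k
decreasing_by all_goals omega

-- per-utterance step equality
theorem step_eq (dt : Int) (st : PySem.Dict String Int × PySem.Dict String Int)
    (uv : String × List Int) :
    (let sd := match aStartGo uv.2 dt 0 0 with
        | some s => st.1.insert uv.1 s
        | none => st.1
     let ed := match aEndGo uv.2 dt uv.2.length 0 with
        | some e => st.2.insert uv.1 e
        | none => st.2
     (sd, ed)) =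
    (let runs := runsGo uv.2 0
     if 1 ≤ dt then
       let good := runs.filter (fun r => dt ≤ r.2.2)
       match good.head?, good.getLast? with
       | some r0, some r1 => (st.1.insert uv.1 r0.1, st.2.insert uv.1 r1.2.1)
       | _, _ => st
     else st) := by
  by_cases hdt : 1 ≤ dt
  · rw [aStart_runs uv.2 dt (by omega) 0]
    rw [show aEndGo uv.2 dt uv.2.length 0 =
        (((runsGoK uv.2 uv.2.length 0).filter (fun r => dt ≤ r.2.2)).getLast?).map (·.2.1) from
      aEnd_runs uv.2 dt (by omega) uv.2.length le_rfl]
    rw [← runsGo_eq_K uv.2 0]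
    simp only [if_pos hdt]
    cases hgood : (runsGo uv.2 0).filter (fun r => dt ≤ r.2.2) with
    | nil => simp
    | cons r rs =>
      have hlast : (r :: rs).getLast?.isSome := by
        simp [List.getLast?_isSome]
      obtain ⟨r1, hr1⟩ := Option.isSome_iff_exists.mp hlast
      simp [hr1]
  · have hdt' : dt ≤ 0 := by omega
    rw [aStartGo_none uv.2 dt hdt' 0 0 le_rfl, aEndGo_none uv.2 dt hdt' uv.2.length 0 le_rfl]
    simp [hdt]

theorem fold_eq (dt : Int) (l : List (String × List Int))
    (st : PySem.Dict String Int × PySem.Dict String Int) :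
    l.foldl (fun st uv =>
      let sd := match aStartGo uv.2 dt 0 0 with
        | some s => st.1.insert uv.1 s
        | none => st.1
      let ed := match aEndGo uv.2 dt uv.2.length 0 with
        | some e => st.2.insert uv.1 e
        | none => st.2
      (sd, ed)) st =
    l.foldl (fun st uv =>
      let runs := runsGo uv.2 0
      if 1 ≤ dt then
        let good := runs.filter (fun r => dt ≤ r.2.2)
        match good.head?, good.getLast? with
        | some r0, some r1 => (st.1.insert uv.1 r0.1, st.2.insert uv.1 r1.2.1)
        | _, _ => st
      else st) st := by
  induction l generalizing st with
  | nil => rfl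
  | cons uv l ih =>
    rw [List.foldl_cons, List.foldl_cons, step_eq dt st uv]
    exact ih _

-- ===== VERDICT (by name: the statement is the Claim_ definition above) =====
theorem get_start_and_end_point_spec : Claim_equal_get_start_and_end_point := by
  intro vad_dict dt _
  unfold Spec_get_start_and_end_point get_start_and_end_point get_start_and_end_point_alt
  rw [fold_eq dt vad_dict (PySem.Dict.empty, PySem.Dict.empty)]
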